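-- pv_equiv track=rewrite | github.com/MaxwellYan95/LeetCodeInterview | .idea/MockInterview1_Jan24th/uniqueEmails.py | localName
-- ===== SOURCE A (Python) =====
-- def localName(name: str):
--     result = "";
--     for char in name:
--         if char == '+':
--             break;
--         if char != '.':
--             result += char
--     return result
-- ===== SOURCE B (Python) =====
-- def localName(name: str):
--     return name.split('+')[0].replace('.', '')
-- ===== Notes on version B (the rewrite author's own statement) =====
-- stated objective: idiomatic
-- what changed: Replaces the accumulating per-character loop with a break by a two-step string-method pipeline: split at the first plus sign and keep the first piece, then delete dots with replace; the C-level string methods give a constant-factor speedup.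
import Mathlib
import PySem

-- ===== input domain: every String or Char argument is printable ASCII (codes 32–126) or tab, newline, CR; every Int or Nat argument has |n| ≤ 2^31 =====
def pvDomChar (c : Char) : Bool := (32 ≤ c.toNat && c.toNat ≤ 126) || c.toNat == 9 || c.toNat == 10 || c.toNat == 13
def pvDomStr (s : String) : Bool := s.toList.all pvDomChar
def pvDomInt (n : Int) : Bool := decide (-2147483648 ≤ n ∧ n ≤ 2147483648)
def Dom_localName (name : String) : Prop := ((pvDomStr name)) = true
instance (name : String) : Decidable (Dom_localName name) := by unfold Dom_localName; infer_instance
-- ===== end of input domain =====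

-- ===== PORT A =====
-- A: single loop over the characters, breaking at '+', appending every non-'.' char.
def localNameLoop (cs : List Char) (result : List Char) : List Char :=
  match cs with
  | [] => result
  | c :: rest =>
      if c = '+' then result
      else if c ≠ '.' then localNameLoop rest (result ++ [c])
      else localNameLoop rest result

def localName (name : String) : String := String.ofList (localNameLoop name.toList [])

-- ===== PORT B =====
-- B: name.split('+')[0].replace('.', '')
def localName_alt (name : String) : String :=
  PySem.Str.replace (PySem.List.pyGetD ((PySem.Str.split? name "+").getD []) 0 "") "." ""

-- ===== PRECONDITION & SPEC =====
def Spec_localName (name : String) (out : String) : Prop := out = localName_alt name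
instance (name : String) (out : String) : Decidable (Spec_localName name out) := by unfold Spec_localName; infer_instance

-- ===== CLAIM (what is proved, stated in full; the proofs are below) =====
def Claim_equal_localName : Prop := ∀ (name : String), Dom_localName name → Spec_localName name (localName name)

-- ===== LEMMAS AND PROOFS =====

-- A's loop builds: accumulator ++ (dots filtered out of the prefix before the first '+').
theorem localNameLoop_eq (cs : List Char) (acc : List Char) :
    localNameLoop cs acc = acc ++ (cs.takeWhile (· ≠ '+')).filter (· ≠ '.') := by
  induction cs generalizing acc with
  | nil => simp [localNameLoop]
  | cons c rest ih =>
      by_cases h : c = '+'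
      · simp [localNameLoop, h]
      · by_cases h2 : c = '.'
        · simp [localNameLoop, h2, ih]
        · simp [localNameLoop, h, h2, ih]

-- replace.go with old = ['.'], new = [] is a dot filter (given enough fuel).
theorem replace_go_dot (fuel : Nat) (l acc : List Char) (h : l.length ≤ fuel) :
    PySem.Chars.replace.go ['.'] [] fuel l acc = acc.reverse ++ l.filter (· ≠ '.') := by
  induction fuel generalizing l acc with
  | zero =>
      have : l = [] := List.eq_nil_of_length_eq_zero (Nat.le_zero.mp h)
      subst this; simp [PySem.Chars.replace.go]
  | succ n ih =>
      cases l with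
      | nil => simp [PySem.Chars.replace.go]
      | cons c rest =>
          simp only [List.length_cons, Nat.succ_le_succ_iff] at h
          by_cases hc : c = '.'
          · simp [PySem.Chars.replace.go, hc, List.isPrefixOf, ih rest acc h]
          · simp [PySem.Chars.replace.go, List.isPrefixOf, hc, Ne.symm hc, ih rest (c :: acc) h]

theorem replace_dot (l : List Char) :
    PySem.Chars.replace l ['.'] [] = l.filter (· ≠ '.') := by
  simpa [PySem.Chars.replace] using replace_go_dot l.length l [] (le_refl _)

-- the first piece produced by splitOn.go with sep = ['+'] is the accumulated current
-- chunk followed by the prefix of l before the first '+'.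
theorem splitOn_go_plus (fuel : Nat) (l cur : List Char) (acc : List (List Char)) (h : l.length ≤ fuel) :
    ∃ rest, PySem.Chars.splitOn.go ['+'] fuel l cur acc
      = acc.reverse ++ (cur.reverse ++ l.takeWhile (· ≠ '+')) :: rest := by
  induction fuel generalizing l cur acc with
  | zero =>
      have : l = [] := List.eq_nil_of_length_eq_zero (Nat.le_zero.mp h)
      subst this
      exact ⟨[], by simp [PySem.Chars.splitOn.go]⟩
  | succ n ih =>
      cases l with
      | nil => exact ⟨[], by simp [PySem.Chars.splitOn.go]⟩
      | cons c rest =>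
          simp only [List.length_cons, Nat.succ_le_succ_iff] at h
          by_cases hc : c = '+'
          · obtain ⟨r2, hr2⟩ := ih rest [] (cur.reverse :: acc) h
            refine ⟨rest.takeWhile (· ≠ '+') :: r2, ?_⟩
            simp [PySem.Chars.splitOn.go, hc, hr2]
          · obtain ⟨r2, hr2⟩ := ih rest (c :: cur) acc h
            refine ⟨r2, ?_⟩
            simp [PySem.Chars.splitOn.go, List.isPrefixOf, hc, Ne.symm hc, hr2]

theorem splitOn_head (l : List Char) :
    ∃ rest, PySem.Chars.splitOn l ['+'] = l.takeWhile (· ≠ '+') :: rest := by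
  obtain ⟨r, hr⟩ := splitOn_go_plus (l.length + 1) l [] [] (by omega)
  exact ⟨r, by simpa [PySem.Chars.splitOn] using hr⟩

-- ===== VERDICT (by name: the statement is the Claim_ definition above) =====
theorem localName_spec : Claim_equal_localName := by
  intro name _
  unfold Spec_localName localName localName_alt
  obtain ⟨rest, hsplit⟩ := splitOn_head name.toList
  -- turn the String-level split into the Chars-level one
  have hmap := PySem.Str.split?_map name "+"
  rw [show ("+" : String).toList = ['+'] from rfl, PySem.Chars.split?, if_neg (by simp)] at hmap
  rw [hsplit] at hmap
  obtain ⟨parts, hparts, hmap'⟩ := Option.map_eq_some_iff.mp hmap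
  cases parts with
  | nil => simp at hmap'
  | cons p ps =>
      simp only [List.map_cons, List.cons.injEq] at hmap'
      rw [hparts]
      simp only [Option.getD_some]
      have h0 : PySem.List.pyGetD (p :: ps) (0 : Int) "" = p := PySem.List.pyGetD_zero_cons _ _ _
      rw [h0]
      apply String.toList_injective
      rw [PySem.Str.toList_replace]
      rw [show ("." : String).toList = ['.'] from rfl, show ("" : String).toList = [] from rfl]
      rw [hmap'.1, replace_dot, String.toList_ofList, localNameLoop_eq]
      simp
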